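-- pv_equiv track=rewrite | github.com/vinay1jain/attack-flow-agent | webapp/backend/app/analyze.py | _resolve_node_id
-- ===== SOURCE A (Python) =====
-- def _resolve_node_id(name: str, name_to_id: dict[str, str]) -> str | None:
--     """Find a node ID by name, using exact then fuzzy matching."""
--     if not name:
--         return None
--     if name in name_to_id:
--         return name_to_id[name]
--     low = name.lower().strip()
--     if low in name_to_id:
--         return name_to_id[low]
--     for key, nid in name_to_id.items():
--         if key.lower().strip() == low:
--             return nid
--     for key, nid in name_to_id.items():
--         kl = key.lower().strip()
--         if low in kl or kl in low:
--             return nid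
--     return None
-- ===== SOURCE B (Python) =====
-- def _resolve_node_id(name: str, name_to_id: dict[str, str]) -> str | None:
--     """Find a node ID by name, using exact then fuzzy matching (single scan)."""
--     if not name:
--         return None
--     if name in name_to_id:
--         return name_to_id[name]
--     low = name.lower().strip()
--     if low in name_to_id:
--         return name_to_id[low]
--     fuzzy = None
--     for key, nid in name_to_id.items():
--         kl = key.lower().strip()
--         if kl == low:
--             return nid
--         if fuzzy is None and (low in kl or kl in low):
--             fuzzy = nid
--     return fuzzy
-- ===== Notes on version B (the rewrite author's own statement) =====
-- stated objective: alternative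
-- what changed: The two sequential scans over name_to_id (exact-normalized scan, then substring scan) are fused into one pass that returns on an exact-normalized hit and records the first substring hit in a pending accumulator returned at the end.
import Mathlib
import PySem

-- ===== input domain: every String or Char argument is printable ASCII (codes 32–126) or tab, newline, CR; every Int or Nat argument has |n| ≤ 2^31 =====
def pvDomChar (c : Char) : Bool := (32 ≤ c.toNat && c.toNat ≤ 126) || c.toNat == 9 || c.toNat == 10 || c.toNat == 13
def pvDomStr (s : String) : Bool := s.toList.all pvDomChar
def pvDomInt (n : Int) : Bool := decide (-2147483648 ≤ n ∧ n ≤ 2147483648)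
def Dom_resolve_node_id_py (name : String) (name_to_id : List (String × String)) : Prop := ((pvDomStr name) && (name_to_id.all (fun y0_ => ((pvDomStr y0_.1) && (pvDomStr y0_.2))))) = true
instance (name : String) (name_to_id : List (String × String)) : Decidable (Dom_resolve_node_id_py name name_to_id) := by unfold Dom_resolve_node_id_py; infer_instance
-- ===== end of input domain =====

-- B fuses A's two sequential scans (exact-normalized, then substring) into one pass
-- with a pending first-substring-match accumulator; the dict-lookup shortcuts stay.

-- dict membership + indexing on an association list: first matching key
def pvLookup (d : List (String × String)) (k : String) : Option String :=
  (d.find? (fun p => p.1 == k)).map (·.2)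

-- ===== PORT A =====
def resolve_node_id_py (name : String) (name_to_id : List (String × String)) : Option String :=
  if name = "" then none
  else
    match pvLookup name_to_id name with
    | some v => some v
    | none =>
      let low := PySem.Str.strip (PySem.Str.lower name)
      match pvLookup name_to_id low with
      | some v => some v
      | none =>
        -- first loop: exact normalized match
        match name_to_id.find? (fun p => PySem.Str.strip (PySem.Str.lower p.1) == low) with
        | some p => some p.2
        | none =>
          -- second loop: substring match either way
          match name_to_id.find? (fun p =>
              PySem.Str.isIn low (PySem.Str.strip (PySem.Str.lower p.1)) ||
              PySem.Str.isIn (PySem.Str.strip (PySem.Str.lower p.1)) low) with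
          | some p => some p.2
          | none => none

-- ===== PORT B =====
-- single fused scan: return on exact-normalized hit, remember first fuzzy hit
def altLoop (low : String) (l : List (String × String)) (fuzzy : Option String) : Option String :=
  match l with
  | [] => fuzzy
  | (key, nid) :: rest =>
    let kl := PySem.Str.strip (PySem.Str.lower key)
    if kl == low then some nid
    else if fuzzy.isNone && (PySem.Str.isIn low kl || PySem.Str.isIn kl low) then
      altLoop low rest (some nid)
    else
      altLoop low rest fuzzy

def resolve_node_id_py_alt (name : String) (name_to_id : List (String × String)) : Option String :=
  if name = "" then none
  else
    match pvLookup name_to_id name with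
    | some v => some v
    | none =>
      let low := PySem.Str.strip (PySem.Str.lower name)
      match pvLookup name_to_id low with
      | some v => some v
      | none => altLoop low name_to_id none

-- ===== PRECONDITION & SPEC =====
def Spec_resolve_node_id_py (name : String) (name_to_id : List (String × String)) (out : Option String) : Prop := out = resolve_node_id_py_alt name name_to_id
instance (name : String) (name_to_id : List (String × String)) (out : Option String) : Decidable (Spec_resolve_node_id_py name name_to_id out) := by unfold Spec_resolve_node_id_py; infer_instance

-- ===== CLAIM (what is proved, stated in full; the proofs are below) =====
def Claim_equal_resolve_node_id_py : Prop := ∀ (name : String) (name_to_id : List (String × String)), Dom_resolve_node_id_py name name_to_id → Spec_resolve_node_id_py name name_to_id (resolve_node_id_py name name_to_id)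

-- ===== LEMMAS AND PROOFS =====

-- the fused loop equals A's two sequential scans, generalized over the accumulator
theorem altLoop_eq (low : String) (l : List (String × String)) (fz : Option String) :
    altLoop low l fz =
      match l.find? (fun p => PySem.Str.strip (PySem.Str.lower p.1) == low) with
      | some p => some p.2
      | none =>
        fz.orElse (fun _ =>
          (l.find? (fun p =>
            PySem.Str.isIn low (PySem.Str.strip (PySem.Str.lower p.1)) ||
            PySem.Str.isIn (PySem.Str.strip (PySem.Str.lower p.1)) low)).map (·.2)) := by
  induction l generalizing fz with
  | nil => cases fz <;> simp [altLoop, Option.orElse]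
  | cons hd tl ih =>
    obtain ⟨key, nid⟩ := hd
    by_cases h1 : (PySem.Str.strip (PySem.Str.lower key) == low) = true
    · simp [altLoop, h1]
    · cases h2 : (PySem.Chars.isIn low.toList (PySem.Chars.strip (PySem.Chars.lower key.toList)) ||
          PySem.Chars.isIn (PySem.Chars.strip (PySem.Chars.lower key.toList)) low.toList) with
      | true => cases fz <;> simp [altLoop, h1, h2, ih]
      | false => cases fz <;> simp [altLoop, h1, h2, ih]

-- ===== VERDICT (by name: the statement is the Claim_ definition above) =====
theorem resolve_node_id_py_spec : Claim_equal_resolve_node_id_py := by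
  intro name name_to_id _
  unfold Spec_resolve_node_id_py resolve_node_id_py resolve_node_id_py_alt
  by_cases h0 : name = ""
  · simp [h0]
  · simp only [h0, if_false]
    cases pvLookup name_to_id name with
    | some v => rfl
    | none =>
      simp only []
      cases hl : pvLookup name_to_id (PySem.Str.strip (PySem.Str.lower name)) with
      | some v => rfl
      | none =>
        rw [altLoop_eq]
        cases name_to_id.find? (fun p => PySem.Str.strip (PySem.Str.lower p.1) ==
            PySem.Str.strip (PySem.Str.lower name)) with
        | some p => rfl
        | none =>
          cases name_to_id.find? (fun p =>
              PySem.Str.isIn (PySem.Str.strip (PySem.Str.lower name)) (PySem.Str.strip (PySem.Str.lower p.1)) ||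
              PySem.Str.isIn (PySem.Str.strip (PySem.Str.lower p.1)) (PySem.Str.strip (PySem.Str.lower name))) <;>
            simp [Option.orElse]
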